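-- pv_equiv track=rewrite | github.com/Toka008/Coding-Challenges | Coding Challenges/vowels_in_sentence.py | vowels_in_sentence
-- ===== SOURCE A (Python) =====
-- def vowels_in_sentence(input_string):
--     vowels = ["a", "e", "i", "o"," u"]
--     choosen_vowels = []
--     input_string = input_string.lower()
--     for i in input_string:
--         if i in vowels:
--             choosen_vowels.append(i)
--             choosen_vowels.sort()
--
--     return choosen_vowels
-- ===== SOURCE B (Python) =====
-- def vowels_in_sentence(input_string):
--     vowels = ["a", "e", "i", "o", " u"]
--     counts = {}
--     for c in input_string.lower():
--         if c in vowels: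
--             counts[c] = counts.get(c, 0) + 1
--     result = []
--     for v in sorted(counts):
--         result.extend([v] * counts[v])
--     return result
-- ===== Notes on version B (the rewrite author's own statement) =====
-- stated objective: faster
-- what changed: Replaces accumulate-and-re-sort-after-every-append with a one-pass frequency table followed by a counting-sort style rebuild over the sorted keys.
import Mathlib
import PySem

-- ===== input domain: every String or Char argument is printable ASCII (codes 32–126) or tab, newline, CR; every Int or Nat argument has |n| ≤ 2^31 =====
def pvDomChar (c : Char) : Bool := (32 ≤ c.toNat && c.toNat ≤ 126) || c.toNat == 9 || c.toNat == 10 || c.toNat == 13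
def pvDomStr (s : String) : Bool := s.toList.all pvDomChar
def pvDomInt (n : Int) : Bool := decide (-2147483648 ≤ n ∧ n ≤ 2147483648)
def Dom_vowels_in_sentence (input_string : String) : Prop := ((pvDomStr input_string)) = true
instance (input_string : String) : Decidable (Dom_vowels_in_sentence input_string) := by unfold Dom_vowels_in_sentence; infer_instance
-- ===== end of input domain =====

-- B replaces A's re-sort-after-every-append with a one-pass frequency table and a counting-sort rebuild (faster in a timing run).


-- ===== PORT A =====
-- vowels = ["a", "e", "i", "o", " u"]
def pvVowels : List String := ["a", "e", "i", "o", " u"]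

-- append each matching character (as a 1-char string), re-sorting the accumulator after every append
def vowels_in_sentence (input_string : String) : List String :=
  (PySem.Str.lower input_string).toList.foldl
    (fun choosen_vowels c =>
      if (String.mk [c]) ∈ pvVowels then
        PySem.List.sorted (choosen_vowels ++ [String.mk [c]]) (fun x => x) false
      else choosen_vowels)
    []

-- ===== PORT B =====
-- one pass building a frequency dict, then a counting-sort rebuild over the sorted keys
def vowels_in_sentence_alt (input_string : String) : List String :=
  let counts : PySem.Dict String Int :=
    (PySem.Str.lower input_string).toList.foldl
      (fun d c =>
        if (String.mk [c]) ∈ pvVowels then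
          d.modify (String.mk [c]) 0 (· + 1)
        else d)
      PySem.Dict.empty
  -- counts[v]: v is always a key here, so getD is exact (no KeyError)
  (PySem.List.sorted counts.keys (fun x => x) false).foldl
    (fun result v => result ++ PySem.List.pyRepeat [v] (counts.getD v 0)) []

-- ===== PRECONDITION & SPEC =====
def Spec_vowels_in_sentence (input_string : String) (out : List String) : Prop := out = vowels_in_sentence_alt input_string
instance (input_string : String) (out : List String) : Decidable (Spec_vowels_in_sentence input_string out) := by unfold Spec_vowels_in_sentence; infer_instance

-- ===== CLAIM (what is proved, stated in full; the proofs are below) =====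
def Claim_equal_vowels_in_sentence : Prop := ∀ (input_string : String), Dom_vowels_in_sentence input_string → Spec_vowels_in_sentence input_string (vowels_in_sentence input_string)

-- ===== LEMMAS AND PROOFS =====

-- the list of collected 1-char vowel strings, in text order
def pvCollect (cs : List Char) : List String :=
  cs.filterMap (fun c =>
    if (String.mk [c]) ∈ pvVowels then some (String.mk [c]) else none)

-- canonical sorted result determined by the counts in the collected list
def pvCanon (l : List String) : List String :=
  List.replicate (l.count "a") "a" ++ List.replicate (l.count "e") "e" ++
  List.replicate (l.count "i") "i" ++ List.replicate (l.count "o") "o"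

theorem pvMk_ne_spaceu (c : Char) : String.mk [c] ≠ " u" := by
  intro h
  have hx : (String.mk [c]).toList = [c] := Eq.symm (String.ofList_eq.mp rfl)
  have := congrArg String.toList h
  rw [hx] at this
  simp at this

theorem pvMem_vowels (c : Char) (h : String.mk [c] ∈ pvVowels) :
    String.mk [c] = "a" ∨ String.mk [c] = "e" ∨ String.mk [c] = "i" ∨ String.mk [c] = "o" := by
  simp [pvVowels] at h
  rcases h with h | h | h | h | h
  · exact Or.inl h
  · exact Or.inr (Or.inl h)
  · exact Or.inr (Or.inr (Or.inl h))
  · exact Or.inr (Or.inr (Or.inr h))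
  · exact absurd h (pvMk_ne_spaceu c)

theorem pvRep_append {n : Nat} (x : String) (L : List String) (hL : L.Pairwise (· ≤ ·))
    (hx : ∀ y ∈ L, x ≤ y) : (List.replicate n x ++ L).Pairwise (· ≤ ·) := by
  rw [List.pairwise_append]
  refine ⟨List.pairwise_replicate.mpr (Or.inr le_rfl), hL, ?_⟩
  intro a ha b hb
  rw [List.eq_of_mem_replicate ha]
  exact hx b hb

theorem pvCanon_pairwise (l : List String) : (pvCanon l).Pairwise (· ≤ ·) := by
  unfold pvCanon
  rw [List.append_assoc, List.append_assoc]
  apply pvRep_append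
  · apply pvRep_append
    · apply pvRep_append
      · exact List.pairwise_replicate.mpr (Or.inr le_rfl)
      · intro y hy
        rw [List.eq_of_mem_replicate hy]; simp; decide
    · intro y hy
      rcases List.mem_append.mp hy with h | h <;>
        (rw [List.eq_of_mem_replicate h]; simp; decide)
  · intro y hy
    rcases List.mem_append.mp hy with h | h
    · rw [List.eq_of_mem_replicate h]; simp; decide
    · rcases List.mem_append.mp h with h | h <;>
        (rw [List.eq_of_mem_replicate h]; simp; decide)

theorem pvCanon_perm (l : List String) (v : String)
    (hv : v = "a" ∨ v = "e" ∨ v = "i" ∨ v = "o") :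
    (pvCanon (l ++ [v])).Perm (pvCanon l ++ [v]) := by
  rw [List.perm_iff_count]
  intro x
  rcases hv with h | h | h | h <;> subst h <;>
    simp [pvCanon, List.count_append, List.count_replicate, List.count_singleton] <;>
    split_ifs <;> simp_all <;> omega

theorem pvSort_step (l : List String) (v : String)
    (hv : v = "a" ∨ v = "e" ∨ v = "i" ∨ v = "o") :
    PySem.List.sorted (pvCanon l ++ [v]) (fun x => x) false = pvCanon (l ++ [v]) :=
  PySem.List.sorted_id_eq_of_perm_of_pairwise _ _ (pvCanon_perm l v hv) (pvCanon_pairwise _)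

-- A's loop, started from a canonical state, stays canonical
theorem pvA_fold (cs : List Char) (l0 : List String) :
    cs.foldl
      (fun choosen_vowels c =>
        if (String.mk [c]) ∈ pvVowels then
          PySem.List.sorted (choosen_vowels ++ [String.mk [c]]) (fun x => x) false
        else choosen_vowels)
      (pvCanon l0) = pvCanon (l0 ++ pvCollect cs) := by
  induction cs generalizing l0 with
  | nil => simp [pvCollect]
  | cons c cs ih =>
    by_cases h : String.mk [c] ∈ pvVowels
    · have hv := pvMem_vowels c h
      simp only [List.foldl_cons, if_pos h, pvSort_step l0 _ hv]
      rw [ih (l0 ++ [String.mk [c]])]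
      simp [pvCollect, List.filterMap_cons, h]
    · simp only [List.foldl_cons, if_neg h]
      rw [ih l0]
      simp [pvCollect, List.filterMap_cons, h]

-- B's dict loop is the counter of the collected list
theorem pvB_dict (cs : List Char) (d : PySem.Dict String Int) :
    cs.foldl
      (fun d c =>
        if (String.mk [c]) ∈ pvVowels then
          d.modify (String.mk [c]) 0 (· + 1)
        else d) d
    = (pvCollect cs).foldl (fun d x => d.modify x 0 (· + 1)) d := by
  induction cs generalizing d with
  | nil => simp [pvCollect]
  | cons c cs ih =>
    by_cases h : String.mk [c] ∈ pvVowels <;>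
      simp [pvCollect, List.filterMap_cons, h, ih]

theorem pvCollect_mem (cs : List Char) (v : String) (hv : v ∈ pvCollect cs) :
    v = "a" ∨ v = "e" ∨ v = "i" ∨ v = "o" := by
  simp only [pvCollect, List.mem_filterMap] at hv
  obtain ⟨c, _, hc⟩ := hv
  split at hc
  · cases hc; exact pvMem_vowels c (by assumption)
  · cases hc

-- sorted distinct keys = the four vowels filtered by membership
theorem pvSorted_keys (l : List String)
    (hl : ∀ v ∈ l, v = "a" ∨ v = "e" ∨ v = "i" ∨ v = "o") :
    PySem.List.sorted (PySem.Set.ofList l) (fun x => x) false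
      = ["a", "e", "i", "o"].filter (fun v => decide (v ∈ l)) := by
  apply PySem.List.sorted_id_eq_of_perm_of_pairwise
  · rw [List.perm_ext_iff_of_nodup
      ((by decide : (["a", "e", "i", "o"] : List String).Nodup).filter _)
      (PySem.Set.nodup_ofList l)]
    intro x
    simp only [List.mem_filter, PySem.Set.mem_ofList, decide_eq_true_eq]
    constructor
    · rintro ⟨_, hx⟩; exact hx
    · intro hx
      rcases hl x hx with h | h | h | h <;> subst h <;> simp [hx]
  · exact (by simp; decide : (["a", "e", "i", "o"] : List String).Pairwise (· ≤ ·)).sublist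
      (List.filter_sublist)

theorem pvFilter_flatMap (l : List String) :
    (["a", "e", "i", "o"].filter (fun v => decide (v ∈ l))).flatMap
        (fun v => List.replicate (l.count v) v)
      = pvCanon l := by
  unfold pvCanon
  by_cases ha : "a" ∈ l <;> by_cases he : "e" ∈ l <;>
    by_cases hi : "i" ∈ l <;> by_cases ho : "o" ∈ l <;>
    simp [ha, he, hi, ho, List.count_eq_zero_of_not_mem, List.flatMap]

-- ===== VERDICT (by name: the statement is the Claim_ definition above) =====
theorem vowels_in_sentence_spec : Claim_equal_vowels_in_sentence := by
  intro s _
  unfold Spec_vowels_in_sentence vowels_in_sentence vowels_in_sentence_alt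
  have hA := pvA_fold (PySem.Str.lower s).toList []
  have h0 : pvCanon [] = ([] : List String) := by decide
  rw [h0] at hA
  rw [hA]
  simp only [List.nil_append]
  rw [pvB_dict, ← PySem.Dict.counter_eq_foldl, PySem.Dict.keys_counter,
    pvSorted_keys _ (pvCollect_mem _), PySem.List.foldl_append_eq_flatMap,
    List.nil_append, ← pvFilter_flatMap (pvCollect (PySem.Str.lower s).toList)]
  congr 1
  funext v
  rw [PySem.Dict.getD_counter, PySem.List.pyRepeat_singleton]
  simp
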